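-- pv_equiv track=rewrite | github.com/alexiri/astra | astra_app/core/views_utils.py | _split_list_field
-- ===== SOURCE A (Python) =====
-- def _split_lines(value: str) -> list[str]:
--     lines = [line.strip() for line in (value or "").splitlines()]
--     return [line for line in lines if line]
--
-- def _split_list_field(value: str) -> list[str]:
--     # Allow comma-separated in addition to newlines.
--     out: list[str] = []
--     for line in _split_lines(value):
--         for part in line.split(","):
--             p = part.strip()
--             if p:
--                 out.append(p)
--     return out
-- ===== SOURCE B (Python) =====
-- def _split_list_field(value: str) -> list[str]:
--     # One flat pass: normalize commas to newlines, then split/strip/filter once.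
--     s = (value or "").replace(",", "\n")
--     return [p for p in (part.strip() for part in s.splitlines()) if p]
-- ===== Notes on version B (the rewrite author's own statement) =====
-- stated objective: simpler
-- what changed: B replaces A's nested split loops (splitlines, then a per-line comma split) by normalizing commas to newlines once and doing a single splitlines/strip/filter pass.
import Mathlib
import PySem

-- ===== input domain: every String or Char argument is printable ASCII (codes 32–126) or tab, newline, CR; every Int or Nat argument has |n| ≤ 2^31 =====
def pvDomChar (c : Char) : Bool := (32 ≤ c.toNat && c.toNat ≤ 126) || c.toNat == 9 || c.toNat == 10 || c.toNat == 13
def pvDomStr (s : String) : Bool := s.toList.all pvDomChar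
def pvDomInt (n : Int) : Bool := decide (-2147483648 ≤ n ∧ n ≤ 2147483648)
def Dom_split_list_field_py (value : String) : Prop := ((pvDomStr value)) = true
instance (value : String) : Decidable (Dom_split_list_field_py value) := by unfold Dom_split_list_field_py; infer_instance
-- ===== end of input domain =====

-- B collapses A's nested splits (lines, then commas per line) into one pass over a
-- comma→newline-normalized string; objective: simpler (one flat traversal).

-- ===== PORT A =====
def split_lines_py (value : String) : List String :=
  let lines := (PySem.Str.splitlines value).map (fun line => PySem.Str.strip line)
  lines.filter (fun line => line ≠ "")

def split_list_field_py (value : String) : List String :=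
  (split_lines_py value).foldl (fun out line =>
    ((PySem.Str.split? line ",").getD []).foldl (fun out part =>
      let p := PySem.Str.strip part
      if p ≠ "" then out ++ [p] else out) out) []

-- ===== PORT B =====
def split_list_field_py_alt (value : String) : List String :=
  let s := PySem.Str.replace value "," "\n"
  ((PySem.Str.splitlines s).map (fun part => PySem.Str.strip part)).filter
    (fun p => p ≠ "")

-- ===== PRECONDITION & SPEC =====
def Spec_split_list_field_py (value : String) (out : List String) : Prop := out = split_list_field_py_alt value
instance (value : String) (out : List String) : Decidable (Spec_split_list_field_py value out) := by unfold Spec_split_list_field_py; infer_instance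

-- ===== CLAIM (what is proved, stated in full; the proofs are below) =====
def Claim_equal_split_list_field_py : Prop := ∀ (value : String), Dom_split_list_field_py value → Spec_split_list_field_py value (split_list_field_py value)

-- ===== LEMMAS AND PROOFS =====

-- "cons onto first group": prepend p to the first group of a group list ([p] if none)
def cfh (p : List Char) (l : List (List Char)) : List (List Char) :=
  match l with | [] => [p] | g :: gs => (p ++ g) :: gs

-- structural mirror of Python splitlines (no accumulator)
def mySL (isB : Char → Bool) : List Char → List (List Char)
  | [] => []
  | '\x0d' :: '\n' :: rest => [] :: mySL isB rest
  | c :: rest => if isB c then [] :: mySL isB rest else cfh [c] (mySL isB rest)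

-- structural mirror of splitting on ","
def cS : List Char → List (List Char)
  | [] => [[]]
  | c :: t => if c = ',' then [] :: cS t else cfh [c] (cS t)

-- the comma→newline substitution B performs
def substC (cs : List Char) : List Char := cs.map (fun c => if c = ',' then '\n' else c)

-- normalized contribution of a single group
def strip1 (g : List Char) : List (List Char) :=
  if PySem.Chars.strip g = [] then [] else [PySem.Chars.strip g]

-- strip each group, drop empties
def normL (l : List (List Char)) : List (List Char) :=
  (l.map PySem.Chars.strip).filter (fun g => g ≠ [])

-- A's combined result over a group list
def FF (l : List (List Char)) : List (List Char) :=
  l.flatMap (fun seg => normL (cS seg))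

-- the break predicate Python splitlines uses
def isBpy (c : Char) : Bool :=
  decide (c.toNat = 10) || decide (c.toNat = 13) || decide (c.toNat = 11) || decide (c.toNat = 12) ||
  decide (c.toNat = 28) || decide (c.toNat = 29) || decide (c.toNat = 30) || decide (c.toNat = 133) ||
  decide (c.toNat = 8232) || decide (c.toNat = 8233)

theorem cfh_cfh (p q : List Char) (l : List (List Char)) :
    cfh p (cfh q l) = cfh (p ++ q) l := by
  cases l <;> simp [cfh]

theorem cfh_nil_of_ne {l : List (List Char)} (h : l ≠ []) : cfh [] l = l := by
  cases l with
  | nil => exact absurd rfl h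
  | cons g gs => simp [cfh]

theorem mySL_cons (isB : Char → Bool) (c : Char) (rest : List Char)
    (hne : ∀ (rest_1 : List Char), c = '\x0d' → rest = '\n' :: rest_1 → False) :
    mySL isB (c :: rest) = if isB c then [] :: mySL isB rest else cfh [c] (mySL isB rest) := by
  rw [mySL.eq_def]
  split
  · next h => exact absurd h (by simp)
  · next h => exfalso; injection h with h1 h2; exact hne _ h1 h2
  · next c' r' h => injection h with h1 h2; subst h1; subst h2; rfl

theorem go_eq (isB : Char → Bool) (cs cur : List Char) (acc : List (List Char)) :
    PySem.Chars.splitlines.go isB cs cur acc =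
      acc.reverse ++ (if cur.reverse = [] then mySL isB cs else cfh cur.reverse (mySL isB cs)) := by
  fun_induction PySem.Chars.splitlines.go with
  | case1 cur acc h => simp_all [mySL, List.isEmpty_iff]
  | case2 cur acc h =>
      simp only [List.isEmpty_iff] at h
      have : cur.reverse ≠ [] := by simpa
      simp [mySL, cfh, this]
  | case3 rest cur acc ih =>
      rw [ih]
      show _ = _ ++ (if _ then mySL isB ('\x0d' :: '\n' :: rest) else _)
      rw [mySL]
      cases h : cur.reverse <;> simp [cfh]
  | case4 c rest cur acc hne hb ih =>
      rw [ih, mySL_cons isB c rest hne]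
      simp only [hb, if_pos]
      cases h : cur.reverse <;> simp [cfh]
  | case5 c rest cur acc hne hb ih =>
      rw [ih, mySL_cons isB c rest hne]
      simp only [Bool.not_eq_true] at hb
      simp only [hb, Bool.false_eq_true, if_false]
      have hrc : (c :: cur).reverse = cur.reverse ++ [c] := by simp
      cases h : cur.reverse with
      | nil => simp [hrc, h]
      | cons a t =>
        have h1 : (cur.reverse ++ [c]) ≠ [] := by simp
        simp only [hrc, if_neg h1, cfh_cfh]
        simp [h]

theorem strip_nil : PySem.Chars.strip [] = [] := by
  simp [PySem.Chars.strip, PySem.Chars.lstrip, PySem.Chars.rstrip]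

theorem splitlines_eq (cs : List Char) :
    PySem.Chars.splitlines cs = mySL isBpy cs := by
  show PySem.Chars.splitlines.go _ cs [] [] = _
  rw [go_eq]
  simp only [List.reverse_nil, List.nil_append]
  congr 1

theorem cS_ne_nil (l : List Char) : cS l ≠ [] := by
  cases l with
  | nil => simp [cS]
  | cons c t =>
    rw [cS]
    split <;> [skip; cases cS t] <;> simp [cfh]

theorem splitOn_go_eq (fuel : Nat) (l cur : List Char) (acc : List (List Char))
    (h : l.length < fuel) :
    PySem.Chars.splitOn.go [','] fuel l cur acc = acc.reverse ++ cfh cur.reverse (cS l) := by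
  induction fuel generalizing l cur acc with
  | zero => omega
  | succ fuel ih =>
    cases l with
    | nil =>
      rw [PySem.Chars.splitOn.go]
      simp [cS, cfh]
      omega
    | cons c t =>
      rw [PySem.Chars.splitOn.go.eq_def]
      simp only []
      by_cases hc : c = ','
      · subst hc
        have hp : [','].isPrefixOf (',' :: t) = true := by simp [List.isPrefixOf]
        rw [if_pos hp]
        simp only [List.length_cons] at h
        rw [show List.drop [','].length (',' :: t) = t from rfl]
        rw [ih _ _ _ (by omega)]
        rw [show ([] : List Char).reverse = [] from rfl]
        rw [cfh_nil_of_ne (cS_ne_nil t)]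
        rw [cS, if_pos rfl]
        simp [cfh]
      · have hp : [','].isPrefixOf (c :: t) = false := by
          simp [List.isPrefixOf]; exact fun hh => absurd hh.symm hc
        rw [if_neg (by simp [hp])]
        simp only [List.length_cons] at h
        rw [ih _ _ _ (by omega)]
        rw [cS, if_neg hc]
        have : (c :: cur).reverse = cur.reverse ++ [c] := by simp
        rw [this, ← cfh_cfh]

theorem splitOn_comma (l : List Char) : PySem.Chars.splitOn l [','] = cS l := by
  show PySem.Chars.splitOn.go [','] (l.length + 1) l [] [] = cS l
  rw [splitOn_go_eq _ _ _ _ (by omega)]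
  simp [cfh_nil_of_ne (cS_ne_nil l)]

theorem replace_go_eq (fuel : Nat) (l acc : List Char) (h : l.length ≤ fuel) :
    PySem.Chars.replace.go [','] ['\n'] fuel l acc = acc.reverse ++ substC l := by
  induction fuel generalizing l acc with
  | zero =>
    have : l = [] := by cases l <;> simp_all
    subst this
    rw [PySem.Chars.replace.go]
    simp [substC]
  | succ fuel ih =>
    cases l with
    | nil =>
      rw [PySem.Chars.replace.go.eq_def]
      simp [substC]
    | cons c t =>
      rw [PySem.Chars.replace.go.eq_def]
      simp only []
      by_cases hc : c = ','
      · subst hc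
        have hp : [','].isPrefixOf (',' :: t) = true := by simp [List.isPrefixOf]
        rw [if_pos hp]
        simp only [List.length_cons] at h
        rw [show List.drop [','].length (',' :: t) = t from rfl]
        rw [ih _ _ (by omega)]
        simp [substC]
      · have hp : [','].isPrefixOf (c :: t) = false := by
          simp [List.isPrefixOf]; exact fun hh => absurd hh.symm hc
        rw [if_neg (by simp [hp])]
        simp only [List.length_cons] at h
        rw [ih _ _ (by omega)]
        simp [substC, hc]

theorem replace_comma (cs : List Char) :
    PySem.Chars.replace cs [','] ['\n'] = substC cs := by
  unfold PySem.Chars.replace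
  rw [if_neg (by simp)]
  rw [replace_go_eq _ _ _ (le_refl _)]
  simp

-- ==== strip lemmas ====

theorem strip_ws_append {w : List Char} (g : List Char) (h : w.all PySem.Chars.isspace) :
    PySem.Chars.strip (w ++ g) = PySem.Chars.strip g := by
  simp only [PySem.Chars.strip, PySem.Chars.lstrip]
  rw [List.dropWhile_append]
  rw [show (List.dropWhile PySem.Chars.isspace w) = [] from
    List.dropWhile_eq_nil_iff.mpr (fun x hx => List.all_eq_true.mp h x hx)]
  simp

theorem strip_append_ws {w : List Char} (g : List Char) (h : w.all PySem.Chars.isspace) :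
    PySem.Chars.strip (g ++ w) = PySem.Chars.strip g := by
  have hwnil : List.dropWhile PySem.Chars.isspace w = [] :=
    List.dropWhile_eq_nil_iff.mpr (fun x hx => List.all_eq_true.mp h x hx)
  have hwrev : List.dropWhile PySem.Chars.isspace w.reverse = [] :=
    List.dropWhile_eq_nil_iff.mpr (fun x hx => List.all_eq_true.mp h x (by simpa using hx))
  simp only [PySem.Chars.strip, PySem.Chars.lstrip, PySem.Chars.rstrip]
  rw [List.dropWhile_append]
  by_cases hg : List.dropWhile PySem.Chars.isspace g = []
  · simp [hg, hwnil]
  · rw [if_neg (by simpa using hg)]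
    rw [List.reverse_append, List.dropWhile_append, hwrev]
    simp

-- ==== cS structure lemmas ====

theorem cS_noComma {w : List Char} (h : ∀ c ∈ w, c ≠ ',') : cS w = [w] := by
  induction w with
  | nil => rfl
  | cons c t ih =>
    rw [cS, if_neg (h c (by simp))]
    rw [ih (fun x hx => h x (by simp [hx]))]
    simp [cfh]

theorem normL_cons (g : List Char) (gs : List (List Char)) :
    normL (g :: gs) = strip1 g ++ normL gs := by
  simp only [normL, strip1, List.map_cons, List.filter_cons]
  split_ifs with h1 h2 h3 <;> simp_all

theorem strip1_nil : strip1 [] = [] := by simp [strip1, strip_nil]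

theorem normL_cfh_cons (p : List Char) (Y : List (List Char)) :
    normL (cfh p ([] :: Y)) = strip1 p ++ normL Y := by
  simp [cfh, normL_cons]

theorem normL_cfh_nil (Y : List (List Char)) : normL (cfh [] Y) = normL Y := by
  cases Y with
  | nil => simp [cfh, normL, strip_nil]
  | cons g gs => simp [cfh]

theorem normL_singleton (p : List Char) : normL [p] = strip1 p := by
  simp only [normL, strip1, List.map_cons, List.map_nil, List.filter]
  split <;> simp_all

theorem isspace_ne_comma {c : Char} (h : PySem.Chars.isspace c = true) : c ≠ ',' := by
  intro hc; subst hc; simp [PySem.Chars.isspace] at h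

theorem norm_cS_pre {w : List Char} (y : List Char) (h : w.all PySem.Chars.isspace) :
    normL (cS (w ++ y)) = normL (cS y) := by
  induction w with
  | nil => simp
  | cons c t ih =>
    have hc : PySem.Chars.isspace c = true := by simp [List.all_cons] at h; exact h.1
    have ht : t.all PySem.Chars.isspace := by simp [List.all_cons] at h; simp [List.all_eq_true]; exact h.2
    rw [List.cons_append, cS, if_neg (isspace_ne_comma hc)]
    obtain ⟨g, gs, hg⟩ : ∃ g gs, cS (t ++ y) = g :: gs := by
      cases hcs : cS (t ++ y) with
      | nil => exact absurd hcs (cS_ne_nil _)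
      | cons g gs => exact ⟨g, gs, rfl⟩
    rw [hg]
    have hsc : PySem.Chars.strip (c :: g) = PySem.Chars.strip g :=
      strip_ws_append (w := [c]) g (by simp [hc])
    rw [show cfh [c] (g :: gs) = (c :: g) :: gs from by simp [cfh]]
    rw [normL_cons]
    rw [show strip1 (c :: g) = strip1 g from by simp [strip1, hsc]]
    have := ih ht
    rw [hg, normL_cons] at this
    exact this

theorem cS_last {w : List Char} (hw : ∀ c ∈ w, c ≠ ',') (t : List Char) :
    ∃ gs g, cS t = gs ++ [g] ∧ cS (t ++ w) = gs ++ [g ++ w] := by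
  induction t with
  | nil => exact ⟨[], [], by simp [cS], by simpa [cS] using cS_noComma hw⟩
  | cons c t ih =>
    obtain ⟨gs, g, h1, h2⟩ := ih
    by_cases hc : c = ','
    · subst hc
      refine ⟨[] :: gs, g, ?_, ?_⟩
      · rw [cS, if_pos rfl, h1]; rfl
      · rw [List.cons_append, cS, if_pos rfl, h2]; rfl
    · cases gs with
      | nil =>
        simp only [List.nil_append] at h1 h2
        refine ⟨[], c :: g, ?_, ?_⟩
        · rw [cS, if_neg hc, h1]; simp [cfh]
        · rw [List.cons_append, cS, if_neg hc, h2]; simp [cfh]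
      | cons g0 gs0 =>
        refine ⟨(c :: g0) :: gs0, g, ?_, ?_⟩
        · rw [cS, if_neg hc, h1]; simp [cfh]
        · rw [List.cons_append, cS, if_neg hc, h2]; simp [cfh]

theorem norm_cS_post {w : List Char} (y : List Char) (h : w.all PySem.Chars.isspace) :
    normL (cS (y ++ w)) = normL (cS y) := by
  obtain ⟨gs, g, h1, h2⟩ := cS_last (fun c hc => isspace_ne_comma (List.all_eq_true.mp h c hc)) y
  rw [h1, h2]
  simp only [normL, List.map_append, List.filter_append, List.map_cons, List.map_nil]
  rw [strip_append_ws g h]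

theorem all_isspace_takeWhile (l : List Char) :
    (List.takeWhile PySem.Chars.isspace l).all PySem.Chars.isspace := by
  rw [List.all_eq_true]
  exact fun x hx => List.mem_takeWhile_imp hx

theorem norm_cS_strip (seg : List Char) :
    normL (cS (PySem.Chars.strip seg)) = normL (cS seg) := by
  have hdecomp : seg = List.takeWhile PySem.Chars.isspace seg ++ PySem.Chars.lstrip seg := by
    simp [PySem.Chars.lstrip, List.takeWhile_append_dropWhile]
  have h1 : normL (cS seg) = normL (cS (PySem.Chars.lstrip seg)) := by
    conv_lhs => rw [hdecomp]
    exact norm_cS_pre _ (all_isspace_takeWhile seg)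
  set y := PySem.Chars.lstrip seg with hy
  have hdecomp2 : y = PySem.Chars.rstrip y ++ (List.takeWhile PySem.Chars.isspace y.reverse).reverse := by
    conv_lhs => rw [← List.reverse_reverse y,
      ← List.takeWhile_append_dropWhile (p := PySem.Chars.isspace) (l := y.reverse)]
    rw [List.reverse_append]
    rfl
  have h2 : normL (cS y) = normL (cS (PySem.Chars.rstrip y)) := by
    conv_lhs => rw [hdecomp2]
    apply norm_cS_post
    rw [List.all_eq_true]
    intro x hx
    exact List.mem_takeWhile_imp (by simpa using hx)
  rw [h1, h2]
  rfl

-- ==== FF lemmas ====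

theorem FF_cons (g : List Char) (gs : List (List Char)) :
    FF (g :: gs) = normL (cS g) ++ FF gs := by simp [FF]

theorem FF_cfh_nil (X : List (List Char)) : FF (cfh [] X) = FF X := by
  cases X with
  | nil => simp [cfh, FF, cS, normL, strip_nil]
  | cons g gs => simp [cfh]

theorem FF_strip_filter (X : List (List Char)) :
    ((X.map PySem.Chars.strip).filter (fun g => g ≠ [])).flatMap (fun seg => normL (cS seg)) = FF X := by
  induction X with
  | nil => simp [FF]
  | cons g gs ih =>
    simp only [List.map_cons, List.filter_cons]
    by_cases h : PySem.Chars.strip g = []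
    · rw [if_neg (by simpa using h)]
      rw [ih]
      rw [FF_cons]
      rw [show normL (cS g) = [] from by rw [← norm_cS_strip, h]; simp [cS, normL, strip_nil]]
      simp
    · rw [if_pos (by simpa using h)]
      rw [List.flatMap_cons, ih, FF_cons, norm_cS_strip]

-- ==== the main lemma ====

theorem substC_cons (c : Char) (t : List Char) :
    substC (c :: t) = (if c = ',' then '\n' else c) :: substC t := by simp [substC]

theorem cS_mid {p : List Char} (hp : ∀ c ∈ p, c ≠ ',') (g : List Char) :
    cS (p ++ ',' :: g) = cfh p ([] :: cS g) := by
  induction p with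
  | nil => rw [List.nil_append, cS, if_pos rfl, cfh_nil_of_ne (by simp)]
  | cons c t ih =>
    rw [List.cons_append, cS, if_neg (hp c (by simp))]
    rw [ih (fun x hx => hp x (by simp [hx])), cfh_cfh]
    rfl

theorem FF_cfh_comma {p : List Char} (hp : ∀ c ∈ p, c ≠ ',') (X : List (List Char)) :
    FF (cfh (p ++ [',']) X) = strip1 p ++ FF (cfh [] X) := by
  cases X with
  | nil =>
    simp only [cfh, FF, List.flatMap_cons, List.flatMap_nil, List.append_nil]
    rw [show p ++ [','] = p ++ ',' :: [] from rfl, cS_mid hp]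
    rw [show cfh p ([] :: cS []) = p :: cS [] from by simp [cfh]]
    rw [normL_cons, show cS [] = [[]] from rfl, normL_cons]
  | cons g gs =>
    rw [show cfh (p ++ [',']) (g :: gs) = (p ++ ',' :: g) :: gs from by simp [cfh]]
    rw [FF_cons, cS_mid hp]
    rw [show cfh p ([] :: cS g) = p :: cS g from by simp [cfh]]
    rw [normL_cons]
    rw [cfh_nil_of_ne (show (g :: gs : List (List Char)) ≠ [] from by simp), FF_cons]
    simp [List.append_assoc]

theorem normL_mySL_break (isB : Char → Bool) (h2 : isB '\n' = true)
    {c : Char} (hc : isB c = true) (p u : List Char) :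
    normL (cfh p (mySL isB (c :: u))) = strip1 p ++ normL (mySL isB u) := by
  by_cases hr : c = '\x0d' ∧ ∃ t, u = '\n' :: t
  · obtain ⟨hc13, t, ht⟩ := hr
    subst hc13; subst ht
    rw [show mySL isB ('\x0d' :: '\n' :: t) = [] :: mySL isB t from by rw [mySL]]
    rw [normL_cfh_cons]
    rw [mySL_cons isB '\n' t (by intro r h1 h2'; simp at h1), if_pos h2]
    rw [normL_cons, strip1_nil, List.nil_append]
  · have hne : ∀ (rest_1 : List Char), c = '\x0d' → u = '\n' :: rest_1 → False := by
      intro r h1 hu; exact hr ⟨h1, r, hu⟩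
    rw [mySL_cons isB c u hne, if_pos hc, normL_cfh_cons]

theorem FF_cfh_break {p : List Char} (hp : ∀ c ∈ p, c ≠ ',') (X : List (List Char)) :
    FF (cfh p ([] :: X)) = strip1 p ++ FF (cfh [] X) := by
  rw [show cfh p ([] :: X) = p :: X from by simp [cfh]]
  rw [FF_cons, cS_noComma hp, normL_singleton, FF_cfh_nil]

theorem main_lemma (isB : Char → Bool) (h1 : isB ',' = false) (h2 : isB '\n' = true)
    (h3 : isB '\x0d' = true) :
    ∀ (cs p : List Char), (∀ c ∈ p, c ≠ ',') →
      FF (cfh p (mySL isB cs)) = normL (cfh p (mySL isB (substC cs))) := by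
  intro cs
  fun_induction mySL isB cs with
  | case1 =>
    intro p hp
    rw [show substC [] = [] from rfl]
    rw [show mySL isB [] = [] from rfl]
    rw [show cfh p ([] : List (List Char)) = [p] from rfl]
    rw [FF_cons, cS_noComma hp, normL_singleton]
    simp only [FF, List.flatMap_nil, List.append_nil]
  | case2 rest ih =>
    intro p hp
    rw [show substC ('\x0d' :: '\n' :: rest) = '\x0d' :: '\n' :: substC rest from by
      simp [substC_cons]]
    rw [show mySL isB ('\x0d' :: '\n' :: substC rest) = [] :: mySL isB (substC rest) from by
      rw [mySL]]
    rw [FF_cfh_break hp, normL_cfh_cons]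
    rw [ih [] (by simp), normL_cfh_nil]
  | case3 c rest hne hb ih =>
    -- isB c = true : line break
    intro p hp
    rw [FF_cfh_break hp]
    rw [show substC (c :: rest) = c :: substC rest from by
      rw [substC_cons, if_neg (by intro h; subst h; rw [h1] at hb; exact absurd hb (by simp))]]
    rw [normL_mySL_break isB h2 hb p (substC rest)]
    rw [ih [] (by simp), normL_cfh_nil]
  | case4 c rest hne hb ih =>
    -- isB c = false : ordinary char or comma
    intro p hp
    simp only [Bool.not_eq_true] at hb
    rw [cfh_cfh]
    by_cases hc : c = ','
    · subst hc
      rw [FF_cfh_comma hp]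
      rw [show substC (',' :: rest) = '\n' :: substC rest from by simp [substC_cons]]
      rw [mySL_cons isB '\n' (substC rest) (by intro r hh _; simp at hh), if_pos h2]
      rw [normL_cfh_cons]
      rw [ih [] (by simp), normL_cfh_nil]
    · rw [show substC (c :: rest) = c :: substC rest from by rw [substC_cons, if_neg hc]]
      have hcr : c ≠ '\x0d' := by intro h; subst h; rw [h3] at hb; simp at hb
      rw [mySL_cons isB c (substC rest) (by intro r hh _; exact absurd hh hcr), if_neg (by simp [hb])]
      rw [cfh_cfh]
      have hpc : ∀ x ∈ p ++ [c], x ≠ ',' := by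
        intro x hx
        rcases List.mem_append.mp hx with h | h
        · exact hp x h
        · simp at h; subst h; exact hc
      exact ih (p ++ [c]) hpc

theorem chars_final (cs : List Char) :
    FF (mySL isBpy cs) = normL (mySL isBpy (substC cs)) := by
  have h := main_lemma isBpy (by decide) (by decide) (by decide) cs [] (by simp)
  rw [FF_cfh_nil] at h
  rw [normL_cfh_nil] at h
  exact h

-- ==== string-level assembly ====

theorem toList_ofList' (l : List Char) : (String.ofList l).toList = l := by
  simp

theorem ofList_ne_empty_iff (l : List Char) : (String.ofList l ≠ "") ↔ l ≠ [] := by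
  constructor
  · intro h hl; subst hl; exact h rfl
  · intro h he
    have := congrArg String.toList he
    simp at this
    exact h this

theorem map_strip_ofList (L : List (List Char)) :
    (L.map String.ofList).map (fun s => PySem.Str.strip s) =
      (L.map PySem.Chars.strip).map String.ofList := by
  simp only [List.map_map]
  apply List.map_congr_left
  intro g _
  show PySem.Str.strip (String.ofList g) = _
  simp only [PySem.Str.strip, toList_ofList']
  rfl

theorem filter_map_ofList (M : List (List Char)) :
    (M.map String.ofList).filter (fun p => p ≠ "") =
      (M.filter (fun g => g ≠ [])).map String.ofList := by
  rw [List.filter_map]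
  congr 1
  apply List.filter_congr
  intro g _
  exact decide_eq_decide.mpr (by simpa using ofList_ne_empty_iff g)

theorem lines_reduce (value : String) :
    ((PySem.Str.splitlines value).map (fun line => PySem.Str.strip line)).filter
        (fun line => line ≠ "") =
      (((mySL isBpy value.toList).map PySem.Chars.strip).filter (fun g => g ≠ [])).map
        String.ofList := by
  rw [show PySem.Str.splitlines value =
        (PySem.Chars.splitlines value.toList).map String.ofList from rfl]
  rw [splitlines_eq, map_strip_ofList, filter_map_ofList]

theorem foldl_if_strip (parts : List String) (out : List String) :
    parts.foldl (fun out part =>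
        let p := PySem.Str.strip part
        if p ≠ "" then out ++ [p] else out) out =
      out ++ (parts.map (fun part => PySem.Str.strip part)).filter (fun p => p ≠ "") := by
  induction parts generalizing out with
  | nil => simp
  | cons part t ih =>
    rw [List.foldl_cons, ih]
    simp only [List.map_cons, List.filter_cons]
    by_cases h : PySem.Str.strip part ≠ ""
    · rw [if_pos h, if_pos (by simpa using h)]
      simp
    · rw [if_neg h, if_neg (by simpa using h)]

theorem parts_reduce (l : List Char) :
    (PySem.Str.split? (String.ofList l) ",").getD [] = (cS l).map String.ofList := by
  rw [show PySem.Str.split? (String.ofList l) "," =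
        Option.map (fun x => List.map String.ofList x)
          (PySem.Chars.split? (String.ofList l).toList ",".toList) from rfl]
  rw [toList_ofList']
  rw [show ",".toList = [','] from rfl]
  rw [show PySem.Chars.split? l [','] = some (PySem.Chars.splitOn l [',']) from by
    simp [PySem.Chars.split?]]
  rw [splitOn_comma]
  rfl

theorem A_reduce (value : String) :
    split_list_field_py value =
      List.map String.ofList (FF (mySL isBpy value.toList)) := by
  unfold split_list_field_py split_lines_py
  simp only []
  rw [lines_reduce]
  rw [show (fun (out : List String) (line : String) =>
        ((PySem.Str.split? line ",").getD []).foldl (fun out part =>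
          let p := PySem.Str.strip part
          if p ≠ "" then out ++ [p] else out) out) =
      (fun out line => out ++
        (((PySem.Str.split? line ",").getD []).map (fun part => PySem.Str.strip part)).filter
          (fun p => p ≠ "")) from by
    funext out line
    exact foldl_if_strip _ _]
  rw [PySem.List.foldl_append_eq_flatMap]
  rw [List.nil_append, List.flatMap_map]
  rw [show (fun (a : List Char) =>
        (((PySem.Str.split? (String.ofList a) ",").getD []).map
          (fun part => PySem.Str.strip part)).filter (fun p => p ≠ "")) =
      (fun l => (normL (cS l)).map String.ofList) from by
    funext l
    rw [parts_reduce, map_strip_ofList, filter_map_ofList]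
    rfl]
  rw [← List.map_flatMap]
  rw [← FF_strip_filter (mySL isBpy value.toList)]

theorem B_reduce (value : String) :
    split_list_field_py_alt value =
      List.map String.ofList (normL (mySL isBpy (substC value.toList))) := by
  unfold split_list_field_py_alt
  simp only []
  have hs : (PySem.Str.replace value "," "\n").toList = substC value.toList := by
    rw [PySem.Str.toList_replace]
    rw [show ",".toList = [','] from rfl, show "\n".toList = ['\n'] from rfl]
    exact replace_comma _
  rw [show PySem.Str.splitlines (PySem.Str.replace value "," "\n") =
        (PySem.Chars.splitlines (PySem.Str.replace value "," "\n").toList).map String.ofList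
      from rfl]
  rw [hs, splitlines_eq, map_strip_ofList, filter_map_ofList]
  rfl

-- ===== VERDICT (by name: the statement is the Claim_ definition above) =====
theorem split_list_field_py_spec : Claim_equal_split_list_field_py := by
  intro value _
  unfold Spec_split_list_field_py
  rw [A_reduce, B_reduce, chars_final]
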